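-- pv_equiv track=rewrite | github.com/rcln/dospordos | CODE/environment.py | _inversion
-- ===== SOURCE A (Python) =====
-- def _inversion(vcn, la, initials):
--     list_reg = []
--
--     lastname = ""
--     name = ""
--     cname = ""
--     partition = ',?[\s]*?'
--     partition2 = '[\s-]+?[a-z]*?[\s-]+?'
--     partition3 = '\.?-?'
--     partition4 = '\.?'
--
--     for a in la:
--         if lastname == "":
--             lastname = a
--         else:
--             lastname += partition2 + a
--
--         for n in vcn:
--             if name == "":
--                 name = n[0]
--             else:
--                 name += partition3 + n[0]
--
--             list_reg.append(lastname + partition + name + partition4)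
--
--         name = ""
--
--     for reg in list_reg:
--         yield reg
-- ===== SOURCE B (Python) =====
-- def _inversion(vcn, la, initials):
--     partition = ',?[\s]*?'
--     partition2 = '[\s-]+?[a-z]*?[\s-]+?'
--     partition3 = '\.?-?'
--     partition4 = '\.?'
--
--     # progressive lastname prefixes over la
--     last_prefixes = []
--     acc = ""
--     for a in la:
--         acc = a if acc == "" else acc + partition2 + a
--         last_prefixes.append(acc)
--
--     # progressive name prefixes over vcn (only needed when something will be yielded)
--     name_prefixes = []
--     if last_prefixes:
--         acc = ""
--         for n in vcn:
--             acc = n[0] if acc == "" else acc + partition3 + n[0]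
--             name_prefixes.append(acc)
--
--     for lp in last_prefixes:
--         for np in name_prefixes:
--             yield lp + partition + np + partition4
-- ===== Notes on version B (the rewrite author's own statement) =====
-- stated objective: alternative
-- what changed: B precomputes the progressive lastname and name prefix tables once each and emits their cross product with a nested yield loop, instead of A rebuilding the name accumulator from scratch inside the lastname loop and collecting everything into a list before yielding.
import Mathlib
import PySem

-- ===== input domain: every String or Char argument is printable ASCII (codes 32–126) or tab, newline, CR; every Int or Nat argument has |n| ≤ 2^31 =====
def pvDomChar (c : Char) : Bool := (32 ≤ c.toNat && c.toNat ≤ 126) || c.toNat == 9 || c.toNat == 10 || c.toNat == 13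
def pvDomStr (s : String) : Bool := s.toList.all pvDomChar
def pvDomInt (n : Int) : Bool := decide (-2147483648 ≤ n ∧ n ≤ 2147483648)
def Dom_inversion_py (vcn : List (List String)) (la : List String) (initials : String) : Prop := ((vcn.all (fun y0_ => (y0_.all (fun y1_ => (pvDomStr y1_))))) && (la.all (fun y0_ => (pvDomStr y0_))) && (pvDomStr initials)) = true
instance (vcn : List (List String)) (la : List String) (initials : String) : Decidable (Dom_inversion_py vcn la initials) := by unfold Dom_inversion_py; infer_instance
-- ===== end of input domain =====

-- B builds the two progressive prefix tables once and emits their cross product,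
-- instead of A's rebuilding of the name accumulator inside the lastname loop (objective: alternative).
-- Both versions are generators in Python; the ports prove equality of the full yielded sequence.

-- ===== PORT A =====
-- inner 'for n in vcn' loop of A; state = (name, list_reg).  n[0] is ported as
-- (PySem.List.pyGet? n 0).getD "" — under Pre_ every n is nonempty, so the default is never used.
def pvA_inner (lastname : String) (vcn : List (List String)) (name : String) (acc : List String) : String × List String :=
  match vcn with
  | [] => (name, acc)
  | n :: rest =>
    let name' := if name = "" then (PySem.List.pyGet? n 0).getD ""
                 else name ++ "\\.?-?" ++ (PySem.List.pyGet? n 0).getD ""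
    pvA_inner lastname rest name' (acc ++ [lastname ++ ",?[\\s]*?" ++ name' ++ "\\.?"])

-- outer 'for a in la' loop of A; state = (lastname, list_reg); name is reset to "" each round
def pvA_outer (vcn : List (List String)) (la : List String) (lastname : String) (acc : List String) : List String :=
  match la with
  | [] => acc
  | a :: rest =>
    let ln := if lastname = "" then a else lastname ++ "[\\s-]+?[a-z]*?[\\s-]+?" ++ a
    pvA_outer vcn rest ln (pvA_inner ln vcn "" acc).2

def inversion_py (vcn : List (List String)) (la : List String) (initials : String) : List String :=
  pvA_outer vcn la "" []

-- ===== PORT B =====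
-- progressive lastname prefixes over la
def pvB_lastPref (la : List String) (acc : String) : List String :=
  match la with
  | [] => []
  | a :: rest =>
    let acc' := if acc = "" then a else acc ++ "[\\s-]+?[a-z]*?[\\s-]+?" ++ a
    acc' :: pvB_lastPref rest acc'

-- progressive name prefixes over vcn (n[0] ported as in port A)
def pvB_namePref (vcn : List (List String)) (acc : String) : List String :=
  match vcn with
  | [] => []
  | n :: rest =>
    let acc' := if acc = "" then (PySem.List.pyGet? n 0).getD ""
                else acc ++ "\\.?-?" ++ (PySem.List.pyGet? n 0).getD ""
    acc' :: pvB_namePref rest acc'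

def inversion_py_alt (vcn : List (List String)) (la : List String) (initials : String) : List String :=
  let lps := pvB_lastPref la ""
  let nps := if lps.isEmpty then [] else pvB_namePref vcn ""
  lps.flatMap (fun lp => nps.map (fun np => lp ++ ",?[\\s]*?" ++ np ++ "\\.?"))

-- ===== PRECONDITION & SPEC =====
-- Pre_ excludes exactly the inputs on which Python A raises IndexError at n[0]:
-- a nonempty la together with some empty inner list in vcn (B raises there too).
def Pre_inversion_py (vcn : List (List String)) (la : List String) (initials : String) : Prop :=
  la = [] ∨ ∀ n ∈ vcn, n ≠ []
instance (vcn : List (List String)) (la : List String) (initials : String) : Decidable (Pre_inversion_py vcn la initials) := by unfold Pre_inversion_py; infer_instance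
def pvWitness_inversion_py : List (List String) × List String × String :=
  ([["juan", "p"], ["maria"]], ["garcia", "lopez"], "jm")

def Spec_inversion_py (vcn : List (List String)) (la : List String) (initials : String) (out : List String) : Prop := out = inversion_py_alt vcn la initials
instance (vcn : List (List String)) (la : List String) (initials : String) (out : List String) : Decidable (Spec_inversion_py vcn la initials out) := by unfold Spec_inversion_py; infer_instance

-- ===== CLAIM (what is proved, stated in full; the proofs are below) =====
def Claim_equal_inversion_py : Prop := ∀ (vcn : List (List String)) (la : List String) (initials : String), Dom_inversion_py vcn la initials → Pre_inversion_py vcn la initials → Spec_inversion_py vcn la initials (inversion_py vcn la initials)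

-- ===== LEMMAS AND PROOFS =====

-- A's inner loop appends exactly the name-prefix table, each entry wrapped with the fixed lastname
theorem pvA_inner_snd (lastname : String) (vcn : List (List String)) :
    ∀ (name : String) (acc : List String),
    (pvA_inner lastname vcn name acc).2
      = acc ++ (pvB_namePref vcn name).map (fun np => lastname ++ ",?[\\s]*?" ++ np ++ "\\.?") := by
  induction vcn with
  | nil => intro name acc; simp [pvA_inner, pvB_namePref]
  | cons n rest ih =>
    intro name acc
    simp only [pvA_inner, pvB_namePref, List.map_cons]
    rw [ih]
    simp

-- A's outer loop produces the flatMap of the lastname-prefix table over the name-prefix table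
theorem pvA_outer_eq (vcn : List (List String)) (la : List String) :
    ∀ (lastname : String) (acc : List String),
    pvA_outer vcn la lastname acc
      = acc ++ (pvB_lastPref la lastname).flatMap
          (fun lp => (pvB_namePref vcn "").map (fun np => lp ++ ",?[\\s]*?" ++ np ++ "\\.?")) := by
  induction la with
  | nil => intro lastname acc; simp [pvA_outer, pvB_lastPref]
  | cons a rest ih =>
    intro lastname acc
    simp only [pvA_outer, pvB_lastPref, List.flatMap_cons]
    rw [ih, pvA_inner_snd]
    simp

-- ===== VERDICT (by name: the statement is the Claim_ definition above) =====
theorem inversion_py_spec : Claim_equal_inversion_py := by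
  intro vcn la initials _ _
  unfold Spec_inversion_py inversion_py inversion_py_alt
  rw [pvA_outer_eq]
  cases la with
  | nil => simp [pvB_lastPref]
  | cons a rest => simp [pvB_lastPref, List.isEmpty]
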